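-- pv_equiv track=rewrite | github.com/sheryloe/BloggerGent | apps/api/app/services/ops/planner_service.py | _normalize_weekdays
-- ===== SOURCE A (Python) =====
-- from typing import Any, Iterable
--
-- def _normalize_weekdays(raw_value: Any) -> tuple[int, ...]:
--     if not isinstance(raw_value, list | tuple | set):
--         return ()
--     weekdays: set[int] = set()
--     for item in raw_value:
--         try:
--             weekday = int(item)
--         except (TypeError, ValueError):
--             continue
--         if 0 <= weekday <= 6:
--             weekdays.add(weekday)
--     return tuple(sorted(weekdays))
-- ===== SOURCE B (Python) =====
-- def _normalize_weekdays(raw_value):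
--     if not isinstance(raw_value, (list, tuple, set)):
--         return ()
--
--     def occurs(d):
--         # does any item of raw_value convert to the candidate weekday d?
--         for item in raw_value:
--             try:
--                 if int(item) == d:
--                     return True
--             except (TypeError, ValueError):
--                 pass
--         return False
--
--     return tuple(d for d in range(7) if occurs(d))
-- ===== Notes on version B (the rewrite author's own statement) =====
-- stated objective: alternative
-- what changed: Instead of accumulating a dedup set in one pass over the input and sorting it, B keeps no accumulator at all: it scans the fixed candidate domain 0..6 in order and emits each candidate for which a membership probe over raw_value finds a matching item, so dedup and order come from the domain scan, not from a set or a sort.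
import Mathlib
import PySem

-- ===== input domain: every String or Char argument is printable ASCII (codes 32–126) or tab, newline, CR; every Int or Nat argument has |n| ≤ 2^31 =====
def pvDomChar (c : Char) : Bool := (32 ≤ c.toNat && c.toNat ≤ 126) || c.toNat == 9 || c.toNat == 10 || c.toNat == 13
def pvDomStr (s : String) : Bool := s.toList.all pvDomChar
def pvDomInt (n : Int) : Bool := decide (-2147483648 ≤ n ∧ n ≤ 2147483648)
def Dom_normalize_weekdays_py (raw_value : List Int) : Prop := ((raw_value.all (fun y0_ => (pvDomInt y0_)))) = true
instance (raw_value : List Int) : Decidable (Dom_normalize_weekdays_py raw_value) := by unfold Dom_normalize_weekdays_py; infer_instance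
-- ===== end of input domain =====

-- B keeps no accumulator: it scans the fixed candidate domain 0..6 in order and emits
-- each candidate for which a membership probe over raw_value succeeds, so dedup and
-- ascending order come from the domain scan instead of A's set plus sort (alternative).

-- ===== PORT A =====
-- the isinstance guard always passes (argument is a list) and int(item) never raises on an int
def normalize_weekdays_py (raw_value : List Int) : List Int :=
  let weekdays : PySem.Set Int :=
    raw_value.foldl (fun s item => if 0 ≤ item ∧ item ≤ 6 then PySem.Set.add s item else s)
      PySem.Set.empty
  PySem.List.sorted weekdays (fun x => x) false

-- ===== PORT B =====
-- occurs(d): a short-circuiting scan of raw_value for an item equal to d (= List.any)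
def pvOccurs (raw_value : List Int) (d : Int) : Bool :=
  raw_value.any (fun item => item == d)

def normalize_weekdays_py_alt (raw_value : List Int) : List Int :=
  (PySem.List.pyRange 0 7 1).filter (fun d => pvOccurs raw_value d)

-- ===== PRECONDITION & SPEC =====
def Spec_normalize_weekdays_py (raw_value : List Int) (out : List Int) : Prop := out = normalize_weekdays_py_alt raw_value
instance (raw_value : List Int) (out : List Int) : Decidable (Spec_normalize_weekdays_py raw_value out) := by unfold Spec_normalize_weekdays_py; infer_instance

-- ===== CLAIM (what is proved, stated in full; the proofs are below) =====
def Claim_equal_normalize_weekdays_py : Prop := ∀ (raw_value : List Int), Dom_normalize_weekdays_py raw_value → Spec_normalize_weekdays_py raw_value (normalize_weekdays_py raw_value)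

-- ===== LEMMAS AND PROOFS =====

-- A's accumulated set: membership
theorem memA (raw : List Int) : ∀ (s : PySem.Set Int) (x : Int),
    x ∈ raw.foldl (fun s item => if 0 ≤ item ∧ item ≤ 6 then PySem.Set.add s item else s) s ↔
      x ∈ s ∨ (x ∈ raw ∧ 0 ≤ x ∧ x ≤ 6) := by
  induction raw with
  | nil => simp
  | cons hd tl ih =>
    intro s x
    simp only [List.foldl_cons]
    by_cases h : 0 ≤ hd ∧ hd ≤ 6
    · simp only [if_pos h, ih, PySem.Set.mem_add, List.mem_cons]
      constructor
      · rintro ((hx | rfl) | hx)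
        · exact Or.inl hx
        · exact Or.inr ⟨Or.inl rfl, h⟩
        · exact Or.inr ⟨Or.inr hx.1, hx.2⟩
      · rintro (hx | ⟨(rfl | hx), hr⟩)
        · exact Or.inl (Or.inl hx)
        · exact Or.inl (Or.inr rfl)
        · exact Or.inr ⟨hx, hr⟩
    · simp only [if_neg h, ih, List.mem_cons]
      constructor
      · rintro (hx | hx)
        · exact Or.inl hx
        · exact Or.inr ⟨Or.inr hx.1, hx.2⟩
      · rintro (hx | ⟨(rfl | hx), hr⟩)
        · exact Or.inl hx
        · exact absurd hr h
        · exact Or.inr ⟨hx, hr⟩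

-- A's accumulated set: no duplicates
theorem nodupA (raw : List Int) : ∀ (s : PySem.Set Int), s.Nodup →
    (raw.foldl (fun s item => if 0 ≤ item ∧ item ≤ 6 then PySem.Set.add s item else s) s).Nodup := by
  induction raw with
  | nil => intro s hs; simpa using hs
  | cons hd tl ih =>
    intro s hs
    simp only [List.foldl_cons]
    split_ifs with h
    · exact ih _ (PySem.Set.nodup_add _ _ hs)
    · exact ih _ hs

-- ===== VERDICT (by name: the statement is the Claim_ definition above) =====
theorem normalize_weekdays_py_spec : Claim_equal_normalize_weekdays_py := by
  intro raw _
  unfold Spec_normalize_weekdays_py normalize_weekdays_py normalize_weekdays_py_alt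
  simp only []
  -- A's result: the unique strictly increasing rearrangement of its accumulated set,
  -- which B produces directly by filtering the ascending candidate range
  apply PySem.List.sorted_eq_of_perm_of_pairwise_lt
  · apply (List.perm_ext_iff_of_nodup ?_ ?_).2
    · intro x
      rw [List.mem_filter, PySem.List.mem_pyRange_one, memA]
      simp only [PySem.Set.empty, pvOccurs, List.any_eq_true, beq_iff_eq]
      constructor
      · rintro ⟨⟨h0, h7⟩, y, hy, rfl⟩
        exact Or.inr ⟨hy, h0, by omega⟩
      · rintro (hx | ⟨hmem, h0, h6⟩)
        · simp at hx
        · exact ⟨⟨h0, by omega⟩, x, hmem, rfl⟩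
    · exact (PySem.List.nodup_pyRange_one 0 7).filter _
    · exact nodupA raw _ List.nodup_nil
  · exact (PySem.List.pairwise_lt_pyRange_one 0 7).filter _
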